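-- pv_equiv track=rewrite | github.com/AngelicaDiazB14/CLASESP. | Quiz1.py | contarDigitosDivisores_aux
-- ===== SOURCE A (Python) =====
-- def contarDigitosDivisores_aux(num,divisor):
--     if(num == 0):
--         return 0
--     else:
--         if((num%10) != 0):
--             if((num%10) % divisor == 0):
--                 return 1 + contarDigitosDivisores_aux(num//10,divisor)
--             else:
--                 return contarDigitosDivisores_aux(num//10,divisor)
--         else:
--                 return contarDigitosDivisores_aux(num//10,divisor)
-- ===== SOURCE B (Python) =====
-- def contarDigitosDivisores_aux(num, divisor):
--     count = 0
--     while num != 0: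
--         d = num % 10
--         if d != 0 and d % divisor == 0:
--             count += 1
--         num //= 10
--     return count
-- ===== Notes on version B (the rewrite author's own statement) =====
-- stated objective: idiomatic
-- what changed: Replaced the tail recursion (and its nested if chain) with an iterative while-loop over num with an explicit count accumulator and a single combined digit test.
import Mathlib
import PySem

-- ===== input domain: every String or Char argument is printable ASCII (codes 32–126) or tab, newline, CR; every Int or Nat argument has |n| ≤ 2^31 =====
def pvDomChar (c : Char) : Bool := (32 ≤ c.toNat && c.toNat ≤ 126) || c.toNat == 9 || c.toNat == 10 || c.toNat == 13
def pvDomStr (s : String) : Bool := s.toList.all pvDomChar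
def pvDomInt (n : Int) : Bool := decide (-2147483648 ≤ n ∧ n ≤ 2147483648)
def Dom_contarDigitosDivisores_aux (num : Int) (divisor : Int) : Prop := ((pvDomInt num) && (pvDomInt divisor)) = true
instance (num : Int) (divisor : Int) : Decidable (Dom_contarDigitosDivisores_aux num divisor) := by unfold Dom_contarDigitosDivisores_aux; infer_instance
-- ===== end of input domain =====

-- B is the same per-digit count written as an idiomatic iterative loop with an accumulator
-- instead of A's tail recursion; return values proved equal on Pre_ (nonnegative num,
-- nonzero divisor unless num = 0), where the Python A returns normally.

-- ===== PORT A =====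
-- fuel makes A's recursion total in Lean; num.toNat + 1 steps suffice for every num ≥ 0
def contarDigitosDivisores_auxFuel (fuel : Nat) (num divisor : Int) : Int :=
  match fuel with
  | 0 => 0
  | f + 1 =>
    if num = 0 then 0
    else
      if PySem.Int.mod num 10 ≠ 0 then
        if PySem.Int.mod (PySem.Int.mod num 10) divisor = 0 then
          1 + contarDigitosDivisores_auxFuel f (PySem.Int.floordiv num 10) divisor
        else
          contarDigitosDivisores_auxFuel f (PySem.Int.floordiv num 10) divisor
      else
        contarDigitosDivisores_auxFuel f (PySem.Int.floordiv num 10) divisor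

def contarDigitosDivisores_aux (num : Int) (divisor : Int) : Int :=
  contarDigitosDivisores_auxFuel (num.toNat + 1) num divisor

-- ===== PORT B =====
-- the while-loop of Source B, with the same fuel bound; count is the loop accumulator
def contarDigitosDivisores_auxLoop (fuel : Nat) (num divisor count : Int) : Int :=
  match fuel with
  | 0 => count
  | f + 1 =>
    if num = 0 then count
    else
      let d := PySem.Int.mod num 10
      contarDigitosDivisores_auxLoop f (PySem.Int.floordiv num 10) divisor
        (if d ≠ 0 ∧ PySem.Int.mod d divisor = 0 then count + 1 else count)

def contarDigitosDivisores_aux_alt (num : Int) (divisor : Int) : Int :=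
  contarDigitosDivisores_auxLoop (num.toNat + 1) num divisor 0

-- ===== PRECONDITION & SPEC =====
-- Pre_ excludes exactly the inputs on which the Python A raises: num < 0 (unbounded
-- recursion, RecursionError) and divisor = 0 with num > 0 (ZeroDivisionError).
def Pre_contarDigitosDivisores_aux (num : Int) (divisor : Int) : Prop :=
  0 ≤ num ∧ (num = 0 ∨ divisor ≠ 0)
instance (num : Int) (divisor : Int) : Decidable (Pre_contarDigitosDivisores_aux num divisor) := by
  unfold Pre_contarDigitosDivisores_aux; infer_instance

def pvWitness_contarDigitosDivisores_aux : Int × Int := (246, 2)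

def Spec_contarDigitosDivisores_aux (num : Int) (divisor : Int) (out : Int) : Prop :=
  out = contarDigitosDivisores_aux_alt num divisor
instance (num : Int) (divisor : Int) (out : Int) : Decidable (Spec_contarDigitosDivisores_aux num divisor out) := by
  unfold Spec_contarDigitosDivisores_aux; infer_instance

-- ===== CLAIM (what is proved, stated in full; the proofs are below) =====
def Claim_equal_contarDigitosDivisores_aux : Prop := ∀ (num : Int) (divisor : Int), Dom_contarDigitosDivisores_aux num divisor → Pre_contarDigitosDivisores_aux num divisor → Spec_contarDigitosDivisores_aux num divisor (contarDigitosDivisores_aux num divisor)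

-- ===== LEMMAS AND PROOFS =====

-- with equal fuel the loop accumulates exactly what the recursion returns
theorem loop_eq_fuel (f : Nat) : ∀ (num divisor count : Int),
    contarDigitosDivisores_auxLoop f num divisor count
      = count + contarDigitosDivisores_auxFuel f num divisor := by
  induction f with
  | zero => intro num divisor count; simp [contarDigitosDivisores_auxLoop, contarDigitosDivisores_auxFuel]
  | succ f ih =>
    intro num divisor count
    simp only [contarDigitosDivisores_auxLoop, contarDigitosDivisores_auxFuel, ih]
    split_ifs <;> omega

-- ===== VERDICT (by name: the statement is the Claim_ definition above) =====
theorem contarDigitosDivisores_aux_spec : Claim_equal_contarDigitosDivisores_aux := by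
  intro num divisor _ _
  unfold Spec_contarDigitosDivisores_aux contarDigitosDivisores_aux contarDigitosDivisores_aux_alt
  rw [loop_eq_fuel]
  ring
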